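-- pv_equiv track=rewrite | github.com/contentfactoryhsad-blip/contactlist | streamlit_backend.py | _drop_unknown_fields
-- ===== SOURCE A (Python) =====
-- from typing import Any, Callable
--
-- WRITE_FIELD_ALIASES: dict[str, str] = {
--     "RR": "R&R",
--     "RequestType": "Request Type",
--     "RequesterEmail": "Requester Email",
--     "AirtableAccess": "Airtable Access",
--     "CurrentAccess": "Current Access",
--     "RequestedAccess": "Requested Access",
--     "ChangeReason": "Change Reason",
--     "AdminComment": "Admin Comment",
--     "CreatedAt": "Created At",
--     "UpdatedAt": "Updated At",
--     "SourceRequestId": "Source Request ID",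
--     "ActivatedAt": "Activated At",
--     "CentralAdminEmail": "Central Admin Email",
--     "AdminNotifyRecipients": "Admin Notify Recipients",
--     "IsActive": "Is Active",
--     "LastSentAt": "Last Sent At",
--     "UserAgent": "User Agent",
--     "AcceptLanguage": "Accept Language",
-- }
--
-- def _drop_unknown_fields(fields: dict[str, Any], unknowns: set[str]) -> dict[str, Any]:
--     if not unknowns:
--         return fields
--
--     alias_to_key = {alias: key for key, alias in WRITE_FIELD_ALIASES.items()}
--     dropped_keys = set(unknowns)
--
--     for unknown in unknowns:
--         canonical_key = alias_to_key.get(unknown)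
--         if canonical_key:
--             dropped_keys.add(canonical_key)
--         alias = WRITE_FIELD_ALIASES.get(unknown)
--         if alias:
--             dropped_keys.add(alias)
--
--     return {key: value for key, value in fields.items() if key not in dropped_keys}
-- ===== SOURCE B (Python) =====
-- from typing import Any
--
-- WRITE_FIELD_ALIASES: dict[str, str] = {
--     "RR": "R&R",
--     "RequestType": "Request Type",
--     "RequesterEmail": "Requester Email",
--     "AirtableAccess": "Airtable Access",
--     "CurrentAccess": "Current Access",
--     "RequestedAccess": "Requested Access",
--     "ChangeReason": "Change Reason",
--     "AdminComment": "Admin Comment",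
--     "CreatedAt": "Created At",
--     "UpdatedAt": "Updated At",
--     "SourceRequestId": "Source Request ID",
--     "ActivatedAt": "Activated At",
--     "CentralAdminEmail": "Central Admin Email",
--     "AdminNotifyRecipients": "Admin Notify Recipients",
--     "IsActive": "Is Active",
--     "LastSentAt": "Last Sent At",
--     "UserAgent": "User Agent",
--     "AcceptLanguage": "Accept Language",
-- }
--
-- def _drop_unknown_fields(fields: dict[str, Any], unknowns: set[str]) -> dict[str, Any]:
--     if not unknowns:
--         return fields
--
--     # Deletion-based: copy fields and pop offending keys, instead of building
--     # a dropped-key set (no reverse alias map; the alias table is scanned once).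
--     result = dict(fields)
--     for unknown in unknowns:
--         result.pop(unknown, None)
--     for key, alias in WRITE_FIELD_ALIASES.items():
--         if key in unknowns or alias in unknowns:
--             result.pop(key, None)
--             result.pop(alias, None)
--     return result
-- ===== Notes on version B (the rewrite author's own statement) =====
-- stated objective: alternative
-- what changed: B is deletion-based: instead of expanding unknowns into a dropped-key set via a reverse alias map and then filtering fields, it copies fields and pops the unknown keys directly, then scans the constant alias table once, popping both members of every (key, alias) pair that meets unknowns; no dropped set and no reverse map are built.
import Mathlib
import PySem

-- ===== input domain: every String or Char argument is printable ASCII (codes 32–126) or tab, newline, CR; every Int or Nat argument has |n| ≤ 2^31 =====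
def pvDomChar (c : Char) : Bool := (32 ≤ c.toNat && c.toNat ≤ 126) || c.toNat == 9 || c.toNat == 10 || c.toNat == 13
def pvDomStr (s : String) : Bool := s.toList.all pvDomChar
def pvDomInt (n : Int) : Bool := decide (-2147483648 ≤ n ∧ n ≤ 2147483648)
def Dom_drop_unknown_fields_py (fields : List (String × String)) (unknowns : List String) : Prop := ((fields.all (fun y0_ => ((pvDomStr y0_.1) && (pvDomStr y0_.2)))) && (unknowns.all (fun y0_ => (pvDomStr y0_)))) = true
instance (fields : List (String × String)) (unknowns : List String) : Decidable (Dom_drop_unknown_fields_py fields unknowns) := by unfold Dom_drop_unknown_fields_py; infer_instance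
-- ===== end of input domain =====

-- B is deletion-based: it pops offending keys from a copy of fields and scans the
-- constant alias table once, instead of A's dropped-key set built through a reverse
-- alias map (objective: alternative decomposition, same cost).

-- ===== PORT A =====
-- module constant WRITE_FIELD_ALIASES (shared by both Pythons)
def pvWFA : PySem.Dict String String := PySem.Dict.ofList [
  ("RR", "R&R"), ("RequestType", "Request Type"), ("RequesterEmail", "Requester Email"),
  ("AirtableAccess", "Airtable Access"), ("CurrentAccess", "Current Access"),
  ("RequestedAccess", "Requested Access"), ("ChangeReason", "Change Reason"),
  ("AdminComment", "Admin Comment"), ("CreatedAt", "Created At"), ("UpdatedAt", "Updated At"),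
  ("SourceRequestId", "Source Request ID"), ("ActivatedAt", "Activated At"),
  ("CentralAdminEmail", "Central Admin Email"), ("AdminNotifyRecipients", "Admin Notify Recipients"),
  ("IsActive", "Is Active"), ("LastSentAt", "Last Sent At"), ("UserAgent", "User Agent"),
  ("AcceptLanguage", "Accept Language")]

-- alias_to_key = {alias: key for key, alias in WRITE_FIELD_ALIASES.items()} (A only)
def pvAliasToKey : PySem.Dict String String := PySem.Dict.ofList (pvWFA.items.map (fun p => (p.2, p.1)))

-- body of A's 'for unknown in unknowns' loop ('if canonical_key:' / 'if alias:' truthiness = ≠ "")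
def pvDropStep (s : PySem.Set String) (u : String) : PySem.Set String :=
  let c := pvAliasToKey.getD u ""
  let s1 := if c ≠ "" then PySem.Set.add s c else s
  let a := pvWFA.getD u ""
  if a ≠ "" then PySem.Set.add s1 a else s1

def drop_unknown_fields_py (fields : List (String × String)) (unknowns : List String) : List (String × String) :=
  if unknowns = [] then fields
  else
    let dropped := unknowns.foldl pvDropStep (PySem.Set.ofList unknowns)
    fields.filter (fun p => !(dropped.contains p.1))

-- ===== PORT B =====
-- 'result.pop(k, None)' removes the entry with key k; on an association list of a
-- Python dict (unique keys) this is exactly filtering that key out.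
def drop_unknown_fields_py_alt (fields : List (String × String)) (unknowns : List String) : List (String × String) :=
  if unknowns = [] then fields
  else
    -- result = dict(fields); for unknown in unknowns: result.pop(unknown, None)
    let result := unknowns.foldl (fun r u => r.filter (fun p => p.1 ≠ u)) fields
    -- for key, alias in WRITE_FIELD_ALIASES.items(): if key in unknowns or alias in unknowns: pop both
    pvWFA.items.foldl (fun r kv =>
      if unknowns.contains kv.1 || unknowns.contains kv.2 then
        (r.filter (fun p => p.1 ≠ kv.1)).filter (fun p => p.1 ≠ kv.2)
      else r) result

-- ===== PRECONDITION & SPEC =====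
def Spec_drop_unknown_fields_py (fields : List (String × String)) (unknowns : List String) (out : List (String × String)) : Prop := out = drop_unknown_fields_py_alt fields unknowns
instance (fields : List (String × String)) (unknowns : List String) (out : List (String × String)) : Decidable (Spec_drop_unknown_fields_py fields unknowns out) := by unfold Spec_drop_unknown_fields_py; infer_instance

-- ===== CLAIM (what is proved, stated in full; the proofs are below) =====
def Claim_equal_drop_unknown_fields_py : Prop := ∀ (fields : List (String × String)) (unknowns : List String), Dom_drop_unknown_fields_py fields unknowns → Spec_drop_unknown_fields_py fields unknowns (drop_unknown_fields_py fields unknowns)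

-- ===== LEMMAS AND PROOFS =====

-- one step of A's loop, as a membership fact
theorem mem_dropStep (s : PySem.Set String) (u k : String) :
    k ∈ pvDropStep s u ↔
      k ∈ s ∨ (pvAliasToKey.getD u "" ≠ "" ∧ k = pvAliasToKey.getD u "") ∨
        (pvWFA.getD u "" ≠ "" ∧ k = pvWFA.getD u "") := by
  unfold pvDropStep
  simp only
  split_ifs <;> simp_all [PySem.Set.mem_add] <;> tauto

-- membership in A's fold of pvDropStep
theorem mem_foldl_dropStep (us : List String) (s : PySem.Set String) (k : String) :
    k ∈ us.foldl pvDropStep s ↔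
      k ∈ s ∨ ∃ u ∈ us,
        (pvAliasToKey.getD u "" ≠ "" ∧ k = pvAliasToKey.getD u "") ∨
        (pvWFA.getD u "" ≠ "" ∧ k = pvWFA.getD u "") := by
  induction us generalizing s with
  | nil => simp
  | cons u us ih =>
    rw [List.foldl_cons, ih, List.exists_mem_cons_iff, mem_dropStep]
    generalize (pvAliasToKey.getD u "" ≠ "" ∧ k = pvAliasToKey.getD u "") = P
    generalize (pvWFA.getD u "" ≠ "" ∧ k = pvWFA.getD u "") = Q
    generalize (∃ u ∈ us, (pvAliasToKey.getD u "" ≠ "" ∧ k = pvAliasToKey.getD u "") ∨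
      (pvWFA.getD u "" ≠ "" ∧ k = pvWFA.getD u "")) = R
    tauto

set_option maxHeartbeats 1000000 in
theorem wfa_nodup : pvWFA.keys.Nodup := by decide
set_option maxHeartbeats 1000000 in
theorem atk_nodup : pvAliasToKey.keys.Nodup := by decide

set_option maxHeartbeats 1000000 in
theorem atk_items : pvAliasToKey.items = pvWFA.items.map (fun p => (p.2, p.1)) := by decide

set_option maxHeartbeats 1000000 in
theorem wfa_values_ne : ∀ p ∈ pvWFA.items, p.1 ≠ "" ∧ p.2 ≠ "" := by decide

-- forward lookup in pvWFA = membership of the pair in the literal table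
theorem wfa_get?_iff (k u : String) : pvWFA.get? k = some u ↔ (k, u) ∈ pvWFA.items :=
  PySem.Dict.get?_eq_some_iff_mem_items _ k u wfa_nodup

-- reverse lookup in pvAliasToKey = swapped membership in the same table
theorem atk_get?_iff (k u : String) : pvAliasToKey.get? k = some u ↔ (u, k) ∈ pvWFA.items := by
  rw [PySem.Dict.get?_eq_some_iff_mem_items _ k u atk_nodup, atk_items, List.mem_map]
  constructor
  · rintro ⟨p, hp, he⟩
    obtain ⟨h1, h2⟩ := Prod.mk.injEq .. ▸ he
    simpa [← h1, ← h2] using hp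
  · intro h; exact ⟨(u, k), h, rfl⟩

-- an 'if canonical_key:' hit of A names a table row whose alias is u
theorem atk_getD_eq_iff (u k : String) :
    (pvAliasToKey.getD u "" ≠ "" ∧ k = pvAliasToKey.getD u "") ↔ (k, u) ∈ pvWFA.items := by
  rw [← wfa_get?_iff, wfa_get?_iff, ← atk_get?_iff u k]
  cases h : pvAliasToKey.get? u with
  | none => simp [PySem.Dict.getD_of_get?_eq_none _ "" h]
  | some v =>
    have hv : (u, v) ∈ pvAliasToKey.items := PySem.Dict.mem_items_of_get?_eq_some _ h
    have hne : v ≠ "" := by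
      rw [atk_items, List.mem_map] at hv
      obtain ⟨p, hp, he⟩ := hv
      obtain ⟨h1, h2⟩ := Prod.mk.injEq .. ▸ he
      exact h2 ▸ (wfa_values_ne p hp).1
    simp [PySem.Dict.getD_of_get?_eq_some _ "" h, hne, eq_comm]

-- an 'if alias:' hit of A names a table row whose key is u
theorem wfa_getD_eq_iff (u k : String) :
    (pvWFA.getD u "" ≠ "" ∧ k = pvWFA.getD u "") ↔ (u, k) ∈ pvWFA.items := by
  rw [← atk_get?_iff, atk_get?_iff, ← wfa_get?_iff u k]
  cases h : pvWFA.get? u with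
  | none => simp [PySem.Dict.getD_of_get?_eq_none _ "" h]
  | some v =>
    have hv : (u, v) ∈ pvWFA.items := PySem.Dict.mem_items_of_get?_eq_some _ h
    have hne : v ≠ "" := (wfa_values_ne _ hv).2
    simp [PySem.Dict.getD_of_get?_eq_some _ "" h, hne, eq_comm]

-- A's dropped set, characterised by rows of the literal table
theorem dropped_contains_iff (unknowns : List String) (k : String) :
    (unknowns.foldl pvDropStep (PySem.Set.ofList unknowns)).contains k = true ↔
      k ∈ unknowns ∨ ∃ kv ∈ pvWFA.items, (kv.1 = k ∧ kv.2 ∈ unknowns) ∨ (kv.2 = k ∧ kv.1 ∈ unknowns) := by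
  rw [PySem.Set.contains_iff, mem_foldl_dropStep, PySem.Set.mem_ofList]
  constructor
  · rintro (h | ⟨u, hu, hc | hc⟩)
    · exact Or.inl h
    · exact Or.inr ⟨(k, u), (atk_getD_eq_iff u k).mp hc, Or.inl ⟨rfl, hu⟩⟩
    · exact Or.inr ⟨(u, k), (wfa_getD_eq_iff u k).mp hc, Or.inr ⟨rfl, hu⟩⟩
  · rintro (h | ⟨⟨a, b⟩, hm, ⟨h1, h2⟩ | ⟨h1, h2⟩⟩)
    · exact Or.inl h
    · exact Or.inr ⟨b, h2, Or.inl ((atk_getD_eq_iff b k).mpr (h1 ▸ hm))⟩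
    · exact Or.inr ⟨a, h2, Or.inr ((wfa_getD_eq_iff a k).mpr (h1 ▸ hm))⟩

-- a fold of conditional filters is one filter (B's two loops)
theorem foldl_filter_eq {γ β : Type} (us : List γ) (l : List β) (q : γ → β → Bool) :
    us.foldl (fun r u => r.filter (q u)) l = l.filter (fun b => us.all (fun u => q u b)) := by
  induction us generalizing l with
  | nil => simp
  | cons u us ih =>
    rw [List.foldl_cons, ih, List.filter_filter]
    simp [Bool.and_comm]

theorem foldl_if_filter2_eq {γ β : Type} (us : List γ) (l : List β) (c : γ → Bool) (q1 q2 : γ → β → Bool) :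
    us.foldl (fun r u => if c u then (r.filter (q1 u)).filter (q2 u) else r) l
      = l.filter (fun b => us.all (fun u => !c u || (q1 u b && q2 u b))) := by
  have h : ∀ (r : List β) (u : γ),
      (if c u then (r.filter (q1 u)).filter (q2 u) else r)
        = r.filter (fun b => !c u || (q1 u b && q2 u b)) := by
    intro r u
    cases hc : c u <;> simp [List.filter_filter, Bool.and_comm]
  calc us.foldl (fun r u => if c u then (r.filter (q1 u)).filter (q2 u) else r) l
      = us.foldl (fun r u => r.filter (fun b => !c u || (q1 u b && q2 u b))) l := by
        congr 1; funext r u; exact h r u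
    _ = _ := foldl_filter_eq us l _

-- pure logic: "not dropped by A" is B's per-row keep condition
theorem keep_core (U : List String) (k : String) (I : List (String × String)) :
    (¬(k ∈ U ∨ ∃ kv ∈ I, (kv.1 = k ∧ kv.2 ∈ U) ∨ (kv.2 = k ∧ kv.1 ∈ U)))
    ↔ ((∀ u ∈ U, ¬ k = u) ∧ ∀ kv ∈ I, (kv.1 ∈ U ∨ kv.2 ∈ U) → (¬ k = kv.1 ∧ ¬ k = kv.2)) := by
  push_neg
  constructor
  · rintro ⟨h1, h2⟩
    refine ⟨fun u hu he => h1 (he ▸ hu), fun kv hkv hor => ?_⟩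
    have h3 := h2 kv hkv
    constructor
    · intro he
      rcases hor with h | h
      · exact h1 (he ▸ h)
      · exact h3.1 he.symm h
    · intro he
      rcases hor with h | h
      · exact h3.2 he.symm h
      · exact h1 (he ▸ h)
  · rintro ⟨h1, h2⟩
    constructor
    · intro hk; exact h1 k hk rfl
    · intro kv hkv
      constructor
      · intro he hu; exact (h2 kv hkv (Or.inr hu)).1 he.symm
      · intro he hu; exact (h2 kv hkv (Or.inl hu)).2 he.symm

-- ===== VERDICT (by name: the statement is the Claim_ definition above) =====
theorem drop_unknown_fields_py_spec : Claim_equal_drop_unknown_fields_py := by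
  intro fields unknowns _
  unfold Spec_drop_unknown_fields_py drop_unknown_fields_py drop_unknown_fields_py_alt
  by_cases hne : unknowns = []
  · simp [hne]
  · simp only [if_neg hne]
    rw [foldl_filter_eq, foldl_if_filter2_eq, List.filter_filter]
    apply List.filter_congr
    intro p _
    rw [Bool.eq_iff_iff]
    rw [Bool.not_eq_true', Bool.eq_false_iff, Ne, dropped_contains_iff, keep_core]
    simp only [Bool.and_eq_true, List.all_eq_true, Bool.or_eq_true,
      decide_eq_true_eq, List.contains_eq_mem, decide_eq_false_iff_not, Prod.forall,
      Bool.not_or, Bool.not_eq_eq_eq_not, Bool.not_true]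
    constructor
    · rintro ⟨h1, h2⟩
      refine ⟨fun a b hm => ?_, h1⟩
      by_cases ha : a ∈ unknowns
      · simpa [ha] using (h2 a b hm (Or.inl ha))
      · by_cases hb : b ∈ unknowns
        · simpa [ha, hb] using (h2 a b hm (Or.inr hb))
        · simp [ha, hb]
    · rintro ⟨h2, h1⟩
      refine ⟨h1, fun a b hm hor => ?_⟩
      have h3 := h2 a b hm
      rcases hor with h | h <;> by_cases hp1 : p.1 = a <;> by_cases hp2 : p.1 = b <;>
        simp_all
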